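-- pv_equiv track=rewrite | github.com/hrishi-inamdar/Reddit-Saved-Manager | helper.py | find_changed_extent
-- ===== SOURCE A (Python) =====
-- def find_changed_extent(old_list, new_list):
--     changed_extent = -1  # how much of the list has been changed from the top
--     size = len(old_list)
--     for i in range(size):
--         x = size - i - 1
--         if old_list[x] != new_list[x]:
--             changed_extent = x
--             break
--     return changed_extent
-- ===== SOURCE B (Python) =====
-- def find_changed_extent(old_list, new_list):
--     diffs = [i for i in range(len(old_list)) if old_list[i] != new_list[i]]
--     return max(diffs) if diffs else -1
-- ===== Notes on version B (the rewrite author's own statement) =====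
-- stated objective: simpler
-- what changed: Replaces the reverse scan with an early break by a forward collect-all-differing-indices comprehension followed by max(diffs) if diffs else -1.
import Mathlib
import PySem

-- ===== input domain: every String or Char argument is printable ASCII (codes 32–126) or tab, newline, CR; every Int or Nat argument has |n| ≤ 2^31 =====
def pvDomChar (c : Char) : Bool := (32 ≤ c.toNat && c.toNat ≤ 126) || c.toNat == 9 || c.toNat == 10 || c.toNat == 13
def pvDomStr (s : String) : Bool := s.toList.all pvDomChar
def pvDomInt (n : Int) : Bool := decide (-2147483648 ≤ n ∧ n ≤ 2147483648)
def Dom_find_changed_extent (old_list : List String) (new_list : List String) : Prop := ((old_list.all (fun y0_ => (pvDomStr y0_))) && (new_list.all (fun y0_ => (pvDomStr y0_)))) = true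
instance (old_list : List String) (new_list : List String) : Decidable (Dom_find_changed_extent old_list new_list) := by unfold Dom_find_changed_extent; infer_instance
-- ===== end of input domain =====

-- B replaces A's reverse scan with early break by a forward collect-then-max decomposition (objective: simpler).


-- ===== PORT A =====
-- A's loop: for i in range(size): x = size-i-1; if old[x] != new[x]: return x; else continue.
-- Indexing is exact on Pre_ (all accessed indices are in range); getD's default is never used there.
def fceDiff (old_list : List String) (new_list : List String) (i : Nat) : Bool :=
  old_list.getD i "" != new_list.getD i ""

def fceLoopA (old_list : List String) (new_list : List String) (size i : Nat) : Int :=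
  if _h : i < size then
    let x := size - i - 1
    if fceDiff old_list new_list x then (x : Int)
    else fceLoopA old_list new_list size (i + 1)
  else -1
termination_by size - i

def find_changed_extent (old_list : List String) (new_list : List String) : Int :=
  fceLoopA old_list new_list old_list.length 0

-- ===== PORT B =====
-- [i for i in range(len(old_list)) if old_list[i] != new_list[i]]; max(diffs) if diffs else -1
def find_changed_extent_alt (old_list : List String) (new_list : List String) : Int :=
  let diffs := (List.range old_list.length).filter (fceDiff old_list new_list)
  match diffs.max? with
  | some m => (m : Int)
  | none => -1

-- ===== PRECONDITION & SPEC =====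
-- Pre_ excludes exactly the inputs where the Python A raises IndexError: new_list shorter than old_list.
def Pre_find_changed_extent (old_list : List String) (new_list : List String) : Prop :=
  old_list.length ≤ new_list.length
instance (old_list : List String) (new_list : List String) : Decidable (Pre_find_changed_extent old_list new_list) := by unfold Pre_find_changed_extent; infer_instance

def pvWitness_find_changed_extent : List String × List String := (["a", "b"], ["a", "c"])

def Spec_find_changed_extent (old_list : List String) (new_list : List String) (out : Int) : Prop := out = find_changed_extent_alt old_list new_list
instance (old_list : List String) (new_list : List String) (out : Int) : Decidable (Spec_find_changed_extent old_list new_list out) := by unfold Spec_find_changed_extent; infer_instance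

-- ===== CLAIM (what is proved, stated in full; the proofs are below) =====
def Claim_equal_find_changed_extent : Prop := ∀ (old_list : List String) (new_list : List String), Dom_find_changed_extent old_list new_list → Pre_find_changed_extent old_list new_list → Spec_find_changed_extent old_list new_list (find_changed_extent old_list new_list)

-- ===== LEMMAS AND PROOFS =====

-- If x is a differing index and every index above it (below n) agrees, the max of the filtered range is x.
theorem fce_max_filter {d : Nat → Bool} {n x : Nat} (hx : x < n) (hdx : d x = true)
    (habove : ∀ y, x < y → y < n → d y = false) :
    ((List.range n).filter d).max? = some x := by
  rw [List.max?_eq_some_iff]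
  refine ⟨List.mem_filter.mpr ⟨List.mem_range.mpr hx, hdx⟩, ?_⟩
  intro b hb
  rcases List.mem_filter.mp hb with ⟨hbr, hbd⟩
  by_contra hlt
  have hfalse := habove b (Nat.not_le.mp hlt) (List.mem_range.mp hbr)
  exact absurd hbd (by simp [hfalse])

-- Loop invariant: if all indices in [size-i, size) agree, the loop computes B's answer.
theorem fceLoopA_eq (old_list new_list : List String) :
    ∀ k i, i ≤ old_list.length → old_list.length - i = k →
    (∀ y, old_list.length - i ≤ y → y < old_list.length → fceDiff old_list new_list y = false) →
    fceLoopA old_list new_list old_list.length i = find_changed_extent_alt old_list new_list := by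
  intro k
  induction k with
  | zero =>
    intro i hle hk habove
    have hi : i = old_list.length := by omega
    rw [fceLoopA]
    simp only [hi, lt_irrefl, dite_false]
    have hnone : ((List.range old_list.length).filter (fceDiff old_list new_list)).max? = none := by
      rw [List.max?_eq_none_iff, List.filter_eq_nil_iff]
      intro a ha
      simp [habove a (by omega) (List.mem_range.mp ha)]
    rw [find_changed_extent_alt]
    simp only [hnone]
  | succ k ih =>
    intro i hle hk habove
    have hlt : i < old_list.length := by omega
    rw [fceLoopA]
    simp only [hlt, dite_true]
    by_cases hd : fceDiff old_list new_list (old_list.length - i - 1) = true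
    · rw [if_pos hd]
      have hmax := fce_max_filter (d := fceDiff old_list new_list)
        (n := old_list.length) (x := old_list.length - i - 1) (by omega) hd
        (fun y h1 h2 => habove y (by omega) h2)
      rw [find_changed_extent_alt]
      simp only [hmax]
    · rw [if_neg hd]
      refine ih (i + 1) (by omega) (by omega) ?_
      intro y h1 h2
      rcases Nat.lt_or_ge y (old_list.length - i) with h | h
      · have hy : y = old_list.length - i - 1 := by omega
        rw [hy]
        exact Bool.eq_false_iff.mpr hd
      · exact habove y h h2

-- ===== VERDICT (by name: the statement is the Claim_ definition above) =====
theorem find_changed_extent_spec : Claim_equal_find_changed_extent := by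
  intro old_list new_list _ _
  unfold Spec_find_changed_extent find_changed_extent
  exact fceLoopA_eq old_list new_list old_list.length 0 (Nat.zero_le _) (by omega)
    (fun y h1 h2 => by omega)
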